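-- pv_equiv track=rewrite | github.com/vinhphuctadang/Polygon | information_theory/baitap3.py | kiemTra
-- ===== SOURCE A (Python) =====
-- def kiemTra(GEN):
--     if len(GEN) % 3 != 0 or len(GEN) // 3 < 3:
--         return False
--
--     if not ( GEN[:3] == 'ATG' and GEN[-3:] in ['TAA', 'TAG', 'TGA'] ):
--         return False
--
--
--     for idx in range(0, len(GEN), 3):
--         sub = GEN[idx:idx+3]
--         for c in sub:
--             if c not in ['A', 'C', 'G', 'T']:
--                 return False
--         for c in ['A', 'C', 'G', 'T']:
--             if sub.count(c) > 1:
--                 return False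
--     return True
-- ===== SOURCE B (Python) =====
-- # Table-driven re-implementation: precompute the 24 valid codons (3 distinct
-- # characters drawn from ACGT) once, chunk the gene into codons once, and decide
-- # everything by membership in that table.
-- VALID_CODONS = frozenset(a + b + c
--                          for a in 'ACGT' for b in 'ACGT' for c in 'ACGT'
--                          if a != b and b != c and a != c)
--
--
-- def kiemTra(GEN):
--     if len(GEN) < 9 or len(GEN) % 3 != 0:
--         return False
--     codons = [GEN[i:i+3] for i in range(0, len(GEN), 3)]
--     return (codons[0] == 'ATG'
--             and codons[-1] in ('TAA', 'TAG', 'TGA')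
--             and all(c in VALID_CODONS for c in codons))
-- ===== Notes on version B (the rewrite author's own statement) =====
-- stated objective: alternative
-- what changed: B precomputes the 24-element table of valid codons (triples of distinct ACGT letters) once, chunks the gene into codons in a single pass, and replaces A's per-codon nested membership and count loops (and A's separate prefix/suffix slicing and divisibility guards) by table membership tests on the codon list, with the start/stop checks read off the first and last codon.
import Mathlib
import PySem

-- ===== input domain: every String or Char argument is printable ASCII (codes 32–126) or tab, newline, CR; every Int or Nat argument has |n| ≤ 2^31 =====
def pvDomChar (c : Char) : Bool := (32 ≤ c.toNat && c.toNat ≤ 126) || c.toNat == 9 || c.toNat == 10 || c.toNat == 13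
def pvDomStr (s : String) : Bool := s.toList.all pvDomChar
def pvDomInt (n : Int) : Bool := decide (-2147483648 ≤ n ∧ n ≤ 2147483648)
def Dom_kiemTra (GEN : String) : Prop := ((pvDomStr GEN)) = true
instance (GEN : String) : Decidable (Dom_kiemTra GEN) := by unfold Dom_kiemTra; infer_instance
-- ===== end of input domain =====

-- B precomputes the 24-element table of valid codons once, chunks the gene into codons
-- in one pass, and decides everything by table membership (objective: alternative).

-- ===== PORT A =====
-- the per-codon loop with its two inner scans and early returns
def kiemTraLoop (l : List Char) : List Int → Bool
  | [] => true
  | idx :: rest =>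
    let sub := PySem.List.slice l (some idx) (some (idx + 3))
    if sub.any (fun c => !(['A', 'C', 'G', 'T'].contains c)) then false
    else if (['A', 'C', 'G', 'T'] : List Char).any (fun c => sub.count c > 1) then false
    else kiemTraLoop l rest

def kiemTra (GEN : String) : Bool :=
  let l := GEN.toList
  let n : Int := PySem.Str.len GEN
  if PySem.Int.mod n 3 ≠ 0 ∨ PySem.Int.floordiv n 3 < 3 then false
  else if ¬ (PySem.List.slice l none (some 3) = "ATG".toList ∧
      PySem.List.slice l (some (-3)) none ∈ ["TAA".toList, "TAG".toList, "TGA".toList]) then false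
  else kiemTraLoop l (PySem.List.pyRange 0 n 3)

-- ===== PORT B =====
-- the module-level table comprehension: all triples of distinct letters from 'ACGT'
def pvValidCodons : PySem.Set (List Char) :=
  PySem.Set.ofList
    ("ACGT".toList.flatMap (fun a =>
      "ACGT".toList.flatMap (fun b =>
        "ACGT".toList.filterMap (fun c =>
          if a ≠ b ∧ b ≠ c ∧ a ≠ c then some [a, b, c] else none))))

def kiemTra_alt (GEN : String) : Bool :=
  let l := GEN.toList
  let n : Int := PySem.Str.len GEN
  if n < 9 ∨ PySem.Int.mod n 3 ≠ 0 then false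
  else
    let codons := (PySem.List.pyRange 0 n 3).map
      (fun i => PySem.List.slice l (some i) (some (i + 3)))
    decide (PySem.List.pyGet? codons 0 = some "ATG".toList) &&
    decide (PySem.List.pyGet? codons (-1) ∈
      [some "TAA".toList, some "TAG".toList, some "TGA".toList]) &&
    codons.all (fun c => PySem.Set.contains pvValidCodons c)

-- ===== PRECONDITION & SPEC =====
def Spec_kiemTra (GEN : String) (out : Bool) : Prop := out = kiemTra_alt GEN
instance (GEN : String) (out : Bool) : Decidable (Spec_kiemTra GEN out) := by unfold Spec_kiemTra; infer_instance

-- ===== CLAIM (what is proved, stated in full; the proofs are below) =====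
def Claim_equal_kiemTra : Prop := ∀ (GEN : String), Dom_kiemTra GEN → Spec_kiemTra GEN (kiemTra GEN)

-- ===== LEMMAS AND PROOFS =====

-- A's two guards are the same condition, written differently
theorem pv_guard (m : Nat) :
    (PySem.Int.mod (m : Int) 3 ≠ 0 ∨ PySem.Int.floordiv (m : Int) 3 < 3) ↔
      ((m : Int) < 9 ∨ PySem.Int.mod (m : Int) 3 ≠ 0) := by
  have h1 : PySem.Int.mod (m : Int) 3 = ((m % 3 : Nat) : Int) := by
    exact_mod_cast PySem.Int.mod_natCast m 3
  have h2 : PySem.Int.floordiv (m : Int) 3 = ((m / 3 : Nat) : Int) := by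
    exact_mod_cast PySem.Int.floordiv_natCast m 3
  rw [h1, h2]
  omega

-- A's loop is an 'all' over the index list
theorem pv_loop_eq_all (l : List Char) (idxs : List Int) :
    kiemTraLoop l idxs = idxs.all (fun idx =>
      !((PySem.List.slice l (some idx) (some (idx + 3))).any
          (fun c => !(['A', 'C', 'G', 'T'].contains c))) &&
      !((['A', 'C', 'G', 'T'] : List Char).any
          (fun c => (PySem.List.slice l (some idx) (some (idx + 3))).count c > 1))) := by
  induction idxs with
  | nil => rfl
  | cons i rest ih =>
    simp only [kiemTraLoop, List.all_cons, ih]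
    cases h1 : ((PySem.List.slice l (some i) (some (i + 3))).any
        (fun c => !(['A', 'C', 'G', 'T'].contains c))) <;>
    cases h2 : ((['A', 'C', 'G', 'T'] : List Char).any
        (fun c => decide (List.count c (PySem.List.slice l (some i) (some (i + 3))) > 1))) <;>
      simp only [Bool.not_true, Bool.not_false, Bool.true_and, Bool.false_and,
        if_true, if_false, Bool.false_eq_true]

-- membership in the codon table, characterised
theorem pv_mem_valid (a b c : Char) :
    [a, b, c] ∈ pvValidCodons ↔
      (a ∈ ("ACGT".toList) ∧ b ∈ ("ACGT".toList) ∧ c ∈ ("ACGT".toList) ∧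
        a ≠ b ∧ b ≠ c ∧ a ≠ c) := by
  unfold pvValidCodons
  rw [PySem.Set.mem_ofList]
  simp only [List.mem_flatMap, List.mem_filterMap]
  constructor
  · rintro ⟨a', ha', b', hb', c', hc', h⟩
    split_ifs at h with hcond
    obtain ⟨rfl, rfl, rfl⟩ : a' = a ∧ b' = b ∧ c' = c := by
      simpa using h
    exact ⟨ha', hb', hc', hcond.1, hcond.2.1, hcond.2.2⟩
  · rintro ⟨ha, hb, hc, h1, h2, h3⟩
    exact ⟨a, ha, b, hb, c, hc, by simp [h1, h2, h3]⟩

-- with all characters in T, per-alphabet count ≤ 1 is exactly Nodup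
theorem pv_count_nodup (sub T : List Char) (hT : ∀ x ∈ sub, x ∈ T) :
    (∀ x ∈ T, sub.count x ≤ 1) ↔ sub.Nodup := by
  rw [List.nodup_iff_count_le_one]
  constructor
  · intro h a
    by_cases ha : a ∈ sub
    · exact h a (hT a ha)
    · simp [List.count_eq_zero_of_not_mem ha]
  · intro h x _
    exact h x

-- A's per-codon body, on a length-3 codon, is table membership
theorem pv_body3 (sub : List Char) (h3 : sub.length = 3) :
    ((!(sub.any (fun c => !(['A', 'C', 'G', 'T'].contains c)))) &&
      (!((['A', 'C', 'G', 'T'] : List Char).any (fun c => sub.count c > 1)))) =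
      PySem.Set.contains pvValidCodons sub := by
  match sub, h3 with
  | [a, b, c], _ =>
    rw [Bool.eq_iff_iff]
    simp only [Bool.and_eq_true, Bool.not_eq_true', List.any_eq_false,
      Bool.not_eq_false, List.contains_iff_mem, decide_eq_true_eq, not_lt,
      PySem.Set.contains, pv_mem_valid]
    constructor
    · rintro ⟨hchars, hcount⟩
      have ha := hchars a (by simp)
      have hb := hchars b (by simp)
      have hc := hchars c (by simp)
      have hnd : ([a, b, c] : List Char).Nodup :=
        (pv_count_nodup [a, b, c] _ hchars).mp hcount
      obtain ⟨⟨hab, hac⟩, hbc⟩ : (¬a = b ∧ ¬a = c) ∧ ¬b = c := by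
        simpa [List.nodup_cons, not_or] using hnd
      exact ⟨ha, hb, hc, hab, hbc, hac⟩
    · rintro ⟨ha, hb, hc, h1, h2, h3'⟩
      have hchars : ∀ x ∈ ([a, b, c] : List Char), x ∈ (['A', 'C', 'G', 'T'] : List Char) := by
        intro x hx
        rcases (by simpa using hx : x = a ∨ x = b ∨ x = c) with rfl | rfl | rfl
        · exact ha
        · exact hb
        · exact hc
      refine ⟨hchars, (pv_count_nodup [a, b, c] _ hchars).mpr ?_⟩
      simp [h1, h2, h3']

-- the index list under the guard: multiples of 3 below 3k
theorem pv_idxs (k : Nat) (hk : 3 ≤ k) :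
    PySem.List.pyRange 0 ((3 * k : Nat) : Int) 3 =
      (List.range k).map (fun j => ((3 * j : Nat) : Int)) := by
  rw [PySem.List.pyRange_of_pos _ _ (by norm_num)]
  have h1 : (0 : Int) < ((3 * k : Nat) : Int) := by push_cast; omega
  rw [if_pos h1]
  have h2 : ((((3 * k : Nat) : Int) - 0 + 3 - 1) / 3).toNat = k := by omega
  rw [h2]
  exact List.map_congr_left (fun j _ => by push_cast; ring)

theorem pv_slice_cast (l : List Char) (m : Nat) :
    PySem.List.slice l (some ((3 * m : Nat) : Int)) (some (((3 * m : Nat) : Int) + 3)) =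
      List.take 3 (List.drop (3 * m) l) := by
  rw [show (((3 * m : Nat) : Int) + 3) = ((3 * m : Nat) : Int) + ((3 : Nat) : Int) from by norm_num,
    PySem.List.slice_natCast_add]

-- ===== VERDICT (by name: the statement is the Claim_ definition above) =====
theorem kiemTra_spec : Claim_equal_kiemTra := by
  intro GEN _
  unfold Spec_kiemTra kiemTra kiemTra_alt
  dsimp only
  rw [PySem.Str.len_eq]
  by_cases hg : (PySem.Int.mod ((GEN.toList.length : Nat) : Int) 3 ≠ 0 ∨
      PySem.Int.floordiv ((GEN.toList.length : Nat) : Int) 3 < 3)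
  · rw [if_pos hg, if_pos ((pv_guard GEN.toList.length).mp hg)]
  · rw [if_neg hg, if_neg (fun h => hg ((pv_guard GEN.toList.length).mpr h))]
    -- the guard gives length = 3k, k ≥ 3
    have hmod : PySem.Int.mod ((GEN.toList.length : Nat) : Int) 3 = 0 := by
      by_contra hm; exact hg (Or.inl hm)
    have hfd : ¬ PySem.Int.floordiv ((GEN.toList.length : Nat) : Int) 3 < 3 := by
      intro hf; exact hg (Or.inr hf)
    have hmod' : PySem.Int.mod ((GEN.toList.length : Nat) : Int) 3 =
        ((GEN.toList.length % 3 : Nat) : Int) := by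
      exact_mod_cast PySem.Int.mod_natCast GEN.toList.length 3
    have hfd' : PySem.Int.floordiv ((GEN.toList.length : Nat) : Int) 3 =
        ((GEN.toList.length / 3 : Nat) : Int) := by
      exact_mod_cast PySem.Int.floordiv_natCast GEN.toList.length 3
    rw [hmod'] at hmod
    rw [hfd'] at hfd
    obtain ⟨k, hlen, hk⟩ : ∃ k, GEN.toList.length = 3 * k ∧ 3 ≤ k := by
      refine ⟨GEN.toList.length / 3, by omega, by omega⟩
    set l := GEN.toList with hl
    rw [hlen, pv_idxs k hk, List.map_map]
    simp only [Function.comp_def]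
    have hslice : ∀ j : Nat,
        PySem.List.slice l (some ((3 * j : Nat) : Int)) (some (((3 * j : Nat) : Int) + 3)) =
          List.take 3 (List.drop (3 * j) l) := fun j => pv_slice_cast l j
    -- head codon
    have hhead : PySem.List.pyGet? ((List.range k).map
        (fun j => PySem.List.slice l (some ((3 * j : Nat) : Int)) (some (((3 * j : Nat) : Int) + 3)))) 0 =
        some (PySem.List.slice l none (some 3)) := by
      rw [PySem.List.pyGet?_zero, List.getElem?_map, List.getElem?_range (by omega : 0 < k)]
      rw [Option.map_some, hslice 0, PySem.List.slice_to l (by norm_num : (0:Int) ≤ 3)]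
      simp
    -- last codon
    have hlast : PySem.List.pyGet? ((List.range k).map
        (fun j => PySem.List.slice l (some ((3 * j : Nat) : Int)) (some (((3 * j : Nat) : Int) + 3)))) (-1) =
        some (PySem.List.slice l (some (-3)) none) := by
      rw [PySem.List.pyGet?_neg_one, List.getLast?_eq_getElem?]
      rw [List.length_map, List.length_range]
      rw [List.getElem?_map, List.getElem?_range (by omega : k - 1 < k)]
      rw [Option.map_some, hslice (k - 1)]
      rw [PySem.List.slice_from_neg_ofNat l 3 (by norm_num)]
      have hlen' : (List.drop (3 * (k - 1)) l).length = 3 := by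
        rw [List.length_drop, hlen]; omega
      rw [List.take_of_length_le (le_of_eq hlen')]
      have he : l.length - 3 = 3 * (k - 1) := by omega
      rw [he]
    -- the loop is the table check over the codon list
    have hloop : kiemTraLoop l ((List.range k).map (fun j => ((3 * j : Nat) : Int))) =
        ((List.range k).map
          (fun j => PySem.List.slice l (some ((3 * j : Nat) : Int)) (some (((3 * j : Nat) : Int) + 3)))).all
          (fun c => PySem.Set.contains pvValidCodons c) := by
      rw [pv_loop_eq_all, List.all_map, List.all_map, Bool.eq_iff_iff,
        List.all_eq_true, List.all_eq_true]
      simp only [Function.comp_def]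
      refine forall_congr' (fun j => imp_congr_right (fun hj => ?_))
      rw [List.mem_range] at hj
      have h3 : (PySem.List.slice l (some ((3 * j : Nat) : Int))
          (some (((3 * j : Nat) : Int) + 3))).length = 3 := by
        rw [hslice j, List.length_take, List.length_drop, hlen]
        omega
      rw [pv_body3 _ h3]
    rw [hloop]
    simp only [hhead, hlast]
    simp
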